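-- pv_equiv track=rewrite | github.com/jeff-donovan/aoc-2024 | 24/24.2_attempt2.py | is_valid_combo
-- ===== SOURCE A (Python) =====
-- def is_valid_combo(combo):
--     outputs = set([])
--     for pair in combo:
--         if pair[0] in outputs or pair[1] in outputs:
--             return False
--         outputs.add(pair[0])
--         outputs.add(pair[1])
--     return True
-- ===== SOURCE B (Python) =====
-- def is_valid_combo(combo):
--     all_elems = []
--     for pair in combo:
--         all_elems.append(pair[0])
--         if pair[1] != pair[0]:
--             all_elems.append(pair[1])
--     return len(set(all_elems)) == len(all_elems)
-- ===== Notes on version B (the rewrite author's own statement) =====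
-- stated objective: alternative
-- what changed: Replaces the element-by-element membership-check-and-early-return loop over a growing set with a construct-then-compare decomposition: build one flat list of elements (deduplicating each pair so a (x, x) pair contributes one element) and return whether the list has no duplicates via len(set(l)) == len(l).
import Mathlib
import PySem

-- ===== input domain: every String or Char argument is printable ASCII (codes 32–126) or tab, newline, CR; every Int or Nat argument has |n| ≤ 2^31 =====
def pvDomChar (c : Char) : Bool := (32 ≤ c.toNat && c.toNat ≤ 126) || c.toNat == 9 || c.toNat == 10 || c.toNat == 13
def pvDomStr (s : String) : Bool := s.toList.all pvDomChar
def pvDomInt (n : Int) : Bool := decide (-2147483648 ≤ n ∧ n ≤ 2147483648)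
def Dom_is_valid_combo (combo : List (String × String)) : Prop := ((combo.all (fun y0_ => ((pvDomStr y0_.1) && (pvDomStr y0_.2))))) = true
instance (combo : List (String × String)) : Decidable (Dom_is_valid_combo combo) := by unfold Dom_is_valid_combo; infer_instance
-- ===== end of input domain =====

-- B replaces A's membership-check-and-early-return loop by building a flat list
-- (each pair deduplicated) and comparing len(set(list)) with len(list); alternative
-- decomposition, same cost.

-- ===== PORT A =====
-- the 'for pair in combo' loop with early 'return False'
def pvALoop : List (String × String) → PySem.Set String → Bool
  | [], _ => true
  | pair :: rest, outputs =>
    if outputs.contains pair.1 || outputs.contains pair.2 then false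
    else pvALoop rest ((outputs.add pair.1).add pair.2)

def is_valid_combo (combo : List (String × String)) : Bool :=
  pvALoop combo PySem.Set.empty

-- ===== PORT B =====
-- build the flat list of elements, deduplicating within each pair
def pvBuild (combo : List (String × String)) : List String :=
  combo.foldl (fun acc pair =>
    let acc := acc ++ [pair.1]
    if pair.2 != pair.1 then acc ++ [pair.2] else acc) []

def is_valid_combo_alt (combo : List (String × String)) : Bool :=
  let all_elems := pvBuild combo
  PySem.Set.len (PySem.Set.ofList all_elems) == all_elems.length

-- ===== PRECONDITION & SPEC =====
def Spec_is_valid_combo (combo : List (String × String)) (out : Bool) : Prop := out = is_valid_combo_alt combo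
instance (combo : List (String × String)) (out : Bool) : Decidable (Spec_is_valid_combo combo out) := by unfold Spec_is_valid_combo; infer_instance

-- ===== CLAIM (what is proved, stated in full; the proofs are below) =====
def Claim_equal_is_valid_combo : Prop := ∀ (combo : List (String × String)), Dom_is_valid_combo combo → Spec_is_valid_combo combo (is_valid_combo combo)

-- ===== LEMMAS AND PROOFS =====

-- per-pair contribution of B's build
def pvContrib (pair : String × String) : List String :=
  if pair.2 = pair.1 then [pair.1] else [pair.1, pair.2]

theorem pvBuild_from (combo : List (String × String)) (acc : List String) :
    combo.foldl (fun acc pair =>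
      let acc := acc ++ [pair.1]
      if pair.2 != pair.1 then acc ++ [pair.2] else acc) acc
      = acc ++ combo.flatMap pvContrib := by
  induction combo generalizing acc with
  | nil => simp
  | cons p rest ih =>
    simp only [List.foldl_cons, List.flatMap_cons, ih, pvContrib]
    by_cases h : p.2 = p.1 <;> simp [h, List.append_assoc]

theorem pvBuild_eq (combo : List (String × String)) :
    pvBuild combo = combo.flatMap pvContrib := by
  exact (pvBuild_from combo []).trans (by simp)

-- len(set(l)) == len(l) is exactly Nodup
theorem pvSetLen_eq_iff (l : List String) :
    ((PySem.Set.len (PySem.Set.ofList l) == (l.length : Int)) = true) ↔ l.Nodup := by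
  have hmem : ∀ x, x ∈ PySem.Set.ofList l ↔ x ∈ l := PySem.Set.mem_ofList l
  have hfin : (PySem.Set.ofList l).toFinset = l.toFinset := List.toFinset.ext hmem
  have hcard : (PySem.Set.ofList l).length = l.toFinset.card := by
    rw [← hfin]; exact (List.toFinset_card_of_nodup (PySem.Set.nodup_ofList l)).symm
  constructor
  · intro h
    have hlen : (PySem.Set.ofList l).length = l.length := by
      simpa [PySem.Set.len] using h
    have hdl : l.dedup.length = l.length := by
      have hfd : l.dedup.toFinset = l.toFinset := List.toFinset.ext (by simp)
      rw [← List.toFinset_card_of_nodup (List.nodup_dedup l), hfd, ← hcard, hlen]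
    have : l.dedup = l := (List.dedup_sublist l).eq_of_length hdl
    rw [← this]; exact List.nodup_dedup l
  · intro h
    rw [PySem.Set.ofList_eq_self_of_nodup l h]
    simp [PySem.Set.len]

-- A's loop computes Nodup of the accumulated-set-plus-flattened-rest
theorem pvALoop_eq (combo : List (String × String)) (S : PySem.Set String)
    (hS : S.Nodup) :
    pvALoop combo S = decide (S ++ combo.flatMap pvContrib).Nodup := by
  induction combo generalizing S with
  | nil => simp [pvALoop, hS]
  | cons p rest ih =>
    have hmem1 : p.1 ∈ pvContrib p := by
      unfold pvContrib; split <;> simp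
    have hmem2 : p.2 ∈ pvContrib p := by
      unfold pvContrib; split
      · next h => simp [h]
      · simp
    simp only [pvALoop, List.flatMap_cons]
    by_cases h1 : p.1 ∈ S
    · have hnot : ¬ (S ++ (pvContrib p ++ rest.flatMap pvContrib)).Nodup := by
        rw [List.nodup_append]
        rintro ⟨-, -, hd⟩
        exact hd p.1 h1 p.1 (List.mem_append_left _ hmem1) rfl
      simp [PySem.Set.contains_eq_listContains, List.contains_eq_mem, h1, hnot]
    · by_cases h2 : p.2 ∈ S
      · have hnot : ¬ (S ++ (pvContrib p ++ rest.flatMap pvContrib)).Nodup := by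
          rw [List.nodup_append]
          rintro ⟨-, -, hd⟩
          exact hd p.2 h2 p.2 (List.mem_append_left _ hmem2) rfl
        simp [PySem.Set.contains_eq_listContains, List.contains_eq_mem, h1, h2, hnot]
      · have hadd : (S.add p.1).add p.2 = S ++ pvContrib p := by
          unfold PySem.Set.add pvContrib
          by_cases h : p.2 = p.1 <;>
            simp [PySem.Set.contains_eq_listContains, List.contains_eq_mem,
              h1, h2, h, List.append_assoc]
        have hS' : ((S.add p.1).add p.2).Nodup := by
          rw [hadd]
          rw [List.nodup_append]
          refine ⟨hS, ?_, ?_⟩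
          · unfold pvContrib
            by_cases h : p.2 = p.1
            · simp [h]
            · simp only [if_neg h]
              refine List.nodup_cons.mpr ⟨?_, List.nodup_singleton _⟩
              simp only [List.mem_singleton]
              exact fun e => h e.symm
          · intro a ha b hb
            unfold pvContrib at hb
            have hb' : b = p.1 ∨ b = p.2 := by
              split at hb
              · exact Or.inl (by simpa using hb)
              · simpa using hb
            rcases hb' with rfl | rfl
            · exact fun e => h1 (e ▸ ha)
            · exact fun e => h2 (e ▸ ha)
        have hrec := ih ((S.add p.1).add p.2) hS'
        simp only [PySem.Set.contains_eq_listContains, List.contains_eq_mem,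
          h1, h2, decide_false, Bool.or_self, Bool.false_eq_true, if_false]
        rw [hrec, hadd, List.append_assoc]

-- ===== VERDICT (by name: the statement is the Claim_ definition above) =====
theorem is_valid_combo_spec : Claim_equal_is_valid_combo := by
  intro combo _
  unfold Spec_is_valid_combo is_valid_combo is_valid_combo_alt
  rw [pvBuild_eq]
  rw [pvALoop_eq combo PySem.Set.empty (by simp [PySem.Set.empty])]
  simp only [PySem.Set.empty, List.nil_append]
  rw [Bool.eq_iff_iff]
  rw [pvSetLen_eq_iff]
  simp
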